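-- pv_equiv track=rewrite | github.com/Gsllchb/code-jam-solutions | src/scrambled_words-small.py | generate_s
-- ===== SOURCE A (Python) =====
-- def generate_s(S1, S2, N, A, B, C, D) -> str:
--     x = [ord(S1), ord(S2)]
--     for _ in range(N - 2):
--         x.append((A * x[-1] + B * x[-2] + C) % D)
--     s = [S1, S2]
--     for xi in x[2:]:
--         s.append(chr(97 + (xi % 26)))
--     return ''.join(s)
-- ===== SOURCE B (Python) =====
-- def generate_s(S1, S2, N, A, B, C, D) -> str:
--     # Cycle detection: the recurrence state (previous two values) lives in a finite
--     # space, so the letter tail is eventually periodic; find the first repeated state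
--     # with a hash map and build the rest of the tail by repeating the cycle, instead
--     # of iterating all N-2 steps.
--     n = N - 2
--     out = [S1, S2]
--     seen = {}
--     state = (ord(S1), ord(S2))
--     i = 0
--     while i < n:
--         if state in seen:
--             j = seen[state]
--             lam = i - j
--             cyc = out[2 + j:2 + i]
--             rem = n - i
--             out.extend((cyc * (rem // lam + 1))[:rem])
--             return ''.join(out)
--         seen[state] = i
--         state = (state[1], (A * state[1] + B * state[0] + C) % D)
--         out.append(chr(97 + state[1] % 26))
--         i += 1
--     return ''.join(out)
-- ===== Notes on version B (the rewrite author's own statement) =====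
-- stated objective: alternative
-- what changed: A iterates all N-2 recurrence steps building the full table and then maps it to letters; B runs cycle detection on the recurrence state (the pair of the last two values) with a hash map and, once a state repeats, builds the rest of the letter tail by repeating the detected cycle instead of iterating the remaining steps.
import Mathlib
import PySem

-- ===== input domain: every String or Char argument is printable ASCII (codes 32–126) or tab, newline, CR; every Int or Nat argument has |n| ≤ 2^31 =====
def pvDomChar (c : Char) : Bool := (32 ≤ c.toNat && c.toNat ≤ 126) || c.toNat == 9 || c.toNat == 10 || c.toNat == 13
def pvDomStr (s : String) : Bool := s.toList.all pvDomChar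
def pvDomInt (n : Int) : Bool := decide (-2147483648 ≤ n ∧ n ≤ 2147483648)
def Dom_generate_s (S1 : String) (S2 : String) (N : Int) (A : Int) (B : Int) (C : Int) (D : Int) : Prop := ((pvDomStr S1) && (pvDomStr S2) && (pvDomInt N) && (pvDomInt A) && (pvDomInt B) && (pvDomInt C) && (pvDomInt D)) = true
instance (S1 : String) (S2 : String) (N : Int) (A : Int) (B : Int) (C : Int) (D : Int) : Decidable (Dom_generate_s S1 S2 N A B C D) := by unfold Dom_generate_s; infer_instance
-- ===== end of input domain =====

-- B replaces A's N-step table build by cycle detection on the recurrence state (the pair of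
-- last two values): the letter tail is eventually periodic, so B finds the first repeated
-- state with a hash map and builds the rest of the tail by repeating the cycle.

-- ord(s) for a one-character string (Pre_ restricts to length 1, where Python's ord returns)
def pvOrd (s : String) : Int :=
  match s.toList with
  | [c] => (c.toNat : Int)
  | _ => 0

-- ===== PORT A =====
def generate_s (S1 : String) (S2 : String) (N : Int) (A : Int) (B : Int) (C : Int) (D : Int) : String :=
  -- x: the full recurrence table built by appending; chr(97 + (xi % 26)) is exact:
  -- 97 + xi % 26 ∈ [97,122], a valid code point
  PySem.Str.join ""
    (((PySem.List.slice
        ((PySem.List.pyRange 0 (N - 2) 1).foldl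
          (fun x _ =>
            x ++ [PySem.Int.mod (A * PySem.List.pyGetD x (-1) 0 + B * PySem.List.pyGetD x (-2) 0 + C) D])
          [pvOrd S1, pvOrd S2])
        (some 2) none).foldl
      (fun s xi => s ++ [String.ofList [Char.ofNat (97 + PySem.Int.mod xi 26).toNat]])
      [S1, S2]))

-- ===== PORT B =====
-- the while-loop of Source B (fuel = n - i, so fuel > 0 ↔ i < n); state is the pair of the last
-- two recurrence values, seen maps state ↦ first index, out is the list of strings joined at the end
def pvBLoop (A B C D : Int) (n : Int) : Nat → Int → (Int × Int) → PySem.Dict (Int × Int) Int → List String → List String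
  | 0, _, _, _, out => out
  | fuel + 1, i, state, seen, out =>
    match seen.get? state with
    | some j =>
      let lam := i - j
      let cyc := PySem.List.slice out (some (2 + j)) (some (2 + i))
      let rem := n - i
      -- Python 'cyc * k' (list repetition) ported by hand as flatten/replicate; exact since k ≥ 0 here
      out ++ PySem.List.slice (List.flatten (List.replicate (PySem.Int.floordiv rem lam + 1).toNat cyc)) none (some rem)
    | none =>
      let state' : Int × Int := (state.2, PySem.Int.mod (A * state.2 + B * state.1 + C) D)
      pvBLoop A B C D n fuel (i + 1) state' (seen.insert state i)
        (out ++ [String.ofList [Char.ofNat (97 + PySem.Int.mod state'.2 26).toNat]])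

def generate_s_alt (S1 : String) (S2 : String) (N : Int) (A : Int) (B : Int) (C : Int) (D : Int) : String :=
  PySem.Str.join ""
    (pvBLoop A B C D (N - 2) (N - 2).toNat 0 (pvOrd S1, pvOrd S2) PySem.Dict.empty [S1, S2])

-- ===== PRECONDITION & SPEC =====
-- Pre_ excludes exactly the inputs where Python A raises: ord() needs one-character strings,
-- and for N ≥ 3 the recurrence takes % D, so D = 0 raises ZeroDivisionError.
def Pre_generate_s (S1 : String) (S2 : String) (N : Int) (A : Int) (B : Int) (C : Int) (D : Int) : Prop :=
  S1.toList.length = 1 ∧ S2.toList.length = 1 ∧ (3 ≤ N → D ≠ 0)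
instance (S1 : String) (S2 : String) (N : Int) (A : Int) (B : Int) (C : Int) (D : Int) : Decidable (Pre_generate_s S1 S2 N A B C D) := by unfold Pre_generate_s; infer_instance

def pvWitness_generate_s : String × String × Int × Int × Int × Int × Int := ("a", "b", 5, 1, 1, 1, 7)

def Spec_generate_s (S1 : String) (S2 : String) (N : Int) (A : Int) (B : Int) (C : Int) (D : Int) (out : String) : Prop := out = generate_s_alt S1 S2 N A B C D
instance (S1 : String) (S2 : String) (N : Int) (A : Int) (B : Int) (C : Int) (D : Int) (out : String) : Decidable (Spec_generate_s S1 S2 N A B C D out) := by unfold Spec_generate_s; infer_instance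

-- ===== CLAIM (what is proved, stated in full; the proofs are below) =====
def Claim_equal_generate_s : Prop := ∀ (S1 : String) (S2 : String) (N : Int) (A : Int) (B : Int) (C : Int) (D : Int), Dom_generate_s S1 S2 N A B C D → Pre_generate_s S1 S2 N A B C D → Spec_generate_s S1 S2 N A B C D (generate_s S1 S2 N A B C D)

-- ===== LEMMAS AND PROOFS =====

-- the one-step map on the state (pair of the last two recurrence values)
def pvStep (A B C D : Int) (st : Int × Int) : Int × Int :=
  (st.2, PySem.Int.mod (A * st.2 + B * st.1 + C) D)

-- the recurrence values A appends (x with its first two entries removed), as a two-scalar chain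
def pvChain (A B C D : Int) : Nat → Int → Int → List Int
  | 0, _, _ => []
  | k + 1, a, b =>
    let new := PySem.Int.mod (A * b + B * a + C) D
    new :: pvChain A B C D k b new

-- the same chain, indexed by the state pair
def pvChainS (A B C D : Int) : Nat → (Int × Int) → List Int
  | 0, _ => []
  | k + 1, st => (pvStep A B C D st).2 :: pvChainS A B C D k (pvStep A B C D st)

-- the character (as a one-string) emitted for one recurrence value
def pvG (v : Int) : String := String.ofList [Char.ofNat (97 + PySem.Int.mod v 26).toNat]

theorem pvChainS_eq_chain (A B C D : Int) (k : Nat) (a b : Int) :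
    pvChainS A B C D k (a, b) = pvChain A B C D k a b := by
  induction k generalizing a b with
  | zero => rfl
  | succ k ih => simp [pvChainS, pvChain, pvStep, ih]

theorem pvChainS_length (A B C D : Int) (k : Nat) (st : Int × Int) :
    (pvChainS A B C D k st).length = k := by
  induction k generalizing st with
  | zero => rfl
  | succ k ih => simp [pvChainS, ih]

theorem pvChainS_add (A B C D : Int) (k m : Nat) (st : Int × Int) :
    pvChainS A B C D (k + m) st
      = pvChainS A B C D k st ++ pvChainS A B C D m ((pvStep A B C D)^[k] st) := by
  induction k generalizing st with
  | zero => simp [pvChainS]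
  | succ k ih =>
    have h : k + 1 + m = (k + m) + 1 := by omega
    rw [h]
    simp only [pvChainS, ih, Function.iterate_succ_apply]
    simp

theorem pvChainS_prefix (A B C D : Int) (m k : Nat) (st : Int × Int) (h : m ≤ k) :
    pvChainS A B C D m st = (pvChainS A B C D k st).take m := by
  have hk : k = m + (k - m) := by omega
  rw [hk, pvChainS_add]
  rw [List.take_append_of_le_length (by simp [pvChainS_length])]
  rw [List.take_of_length_le (by simp [pvChainS_length])]

theorem pvChainS_periodic (A B C D : Int) (lam : Nat) (st : Int × Int)
    (hlam : 0 < lam) (hfix : (pvStep A B C D)^[lam] st = st) :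
    ∀ (q rem : Nat), rem ≤ q * lam →
      pvChainS A B C D rem st
        = ((List.replicate q (pvChainS A B C D lam st)).flatten).take rem := by
  intro q
  induction q with
  | zero => intro rem h; simp at h; simp [h, pvChainS]
  | succ q ih =>
    intro rem h
    rw [List.replicate_succ, List.flatten_cons]
    by_cases hr : rem ≤ lam
    · rw [List.take_append_of_le_length (by simp [pvChainS_length, hr])]
      exact pvChainS_prefix A B C D rem lam st hr
    · have hrem : rem = lam + (rem - lam) := by omega
      rw [hrem, pvChainS_add, hfix, List.take_append]
      have h1 : List.take (lam + (rem - lam)) (pvChainS A B C D lam st) = pvChainS A B C D lam st :=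
        List.take_of_length_le (by rw [pvChainS_length]; omega)
      have h2 : lam + (rem - lam) - (pvChainS A B C D lam st).length = rem - lam := by
        rw [pvChainS_length]; omega
      have hb : rem - lam ≤ q * lam := by
        have := Nat.add_mul q 1 lam
        omega
      rw [h1, h2, ← ih (rem - lam) hb]

theorem foldl_ignore_eq_iterate {α β : Type} (l : List β) (f : α → α) (init : α) :
    l.foldl (fun x _ => f x) init = f^[l.length] init := by
  induction l generalizing init with
  | nil => rfl
  | cons h t ih => simp [List.foldl, ih, Function.iterate_succ_apply]

theorem pvGetD_neg_one_two (a b : Int) (y : List Int) :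
    PySem.List.pyGetD (y ++ [a, b]) (-1) 0 = b := by
  have h : y ++ [a, b] = (y ++ [a]) ++ [b] := by simp
  rw [h, PySem.List.pyGetD_neg_one_append_singleton]

theorem pvGetD_neg_two_two (a b : Int) (y : List Int) :
    PySem.List.pyGetD (y ++ [a, b]) (-2) 0 = a := by
  rw [PySem.List.pyGetD_neg_ofNat (y ++ [a, b]) 2 0 (by omega) (by simp)]
  simp

theorem pvIterate_step (A B C D : Int) (k : Nat) :
    ∀ (y : List Int) (a b : Int),
    (fun x : List Int =>
        x ++ [PySem.Int.mod (A * PySem.List.pyGetD x (-1) 0 + B * PySem.List.pyGetD x (-2) 0 + C) D])^[k]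
      (y ++ [a, b])
      = y ++ [a, b] ++ pvChain A B C D k a b := by
  induction k with
  | zero => intro y a b; simp [pvChain]
  | succ k ih =>
    intro y a b
    rw [Function.iterate_succ_apply]
    simp only [pvGetD_neg_one_two, pvGetD_neg_two_two]
    have h : y ++ [a, b] ++ [PySem.Int.mod (A * b + B * a + C) D]
        = (y ++ [a]) ++ [b, PySem.Int.mod (A * b + B * a + C) D] := by simp
    rw [h, ih (y ++ [a]) b (PySem.Int.mod (A * b + B * a + C) D)]
    simp [pvChain]

theorem pv_flatten_replicate_map {α β : Type} (f : α → β) (k : Nat) (l : List α) :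
    (List.replicate k (l.map f)).flatten = ((List.replicate k l).flatten).map f := by
  induction k with
  | zero => rfl
  | succ k ih => simp only [List.replicate_succ, List.flatten_cons, List.map_append, ih]

-- the loop invariant for B: with state = step^[i] s0, out = [S1,S2] ++ the i characters so far,
-- and every seen entry recording a true earlier state index, the loop produces all n characters
theorem pvBLoop_inv (A B C D : Int) (S1 S2 : String) (s0 : Int × Int) (nN : Nat) :
    ∀ (fuel iN : Nat) (seen : PySem.Dict (Int × Int) Int),
    fuel + iN = nN →
    (∀ st j, seen.get? st = some j → ∃ jn : Nat, j = (jn : Int) ∧ jn < iN ∧ (pvStep A B C D)^[jn] s0 = st) →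
    pvBLoop A B C D (nN : Int) fuel (iN : Int) ((pvStep A B C D)^[iN] s0) seen
        ([S1, S2] ++ (pvChainS A B C D iN s0).map pvG)
      = [S1, S2] ++ (pvChainS A B C D nN s0).map pvG := by
  intro fuel
  induction fuel with
  | zero =>
    intro iN seen hn _
    have : iN = nN := by omega
    subst this
    rfl
  | succ fuel ih =>
    intro iN seen hn hseen
    rw [pvBLoop]
    cases hget : PySem.Dict.get? seen ((pvStep A B C D)^[iN] s0) with
    | none =>
      simp only []
      have hs : pvStep A B C D ((pvStep A B C D)^[iN] s0) = (pvStep A B C D)^[iN + 1] s0 :=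
        (Function.iterate_succ_apply' _ _ _).symm
      show pvBLoop A B C D (nN : Int) fuel ((iN : Int) + 1)
            (pvStep A B C D ((pvStep A B C D)^[iN] s0))
            (seen.insert ((pvStep A B C D)^[iN] s0) (iN : Int))
            (([S1, S2] ++ (pvChainS A B C D iN s0).map pvG)
              ++ [pvG ((pvStep A B C D ((pvStep A B C D)^[iN] s0)).2)])
          = [S1, S2] ++ (pvChainS A B C D nN s0).map pvG
      have hcast : (iN : Int) + 1 = ((iN + 1 : Nat) : Int) := by push_cast; ring
      have hchain : pvChainS A B C D (iN + 1) s0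
          = pvChainS A B C D iN s0 ++ [((pvStep A B C D)^[iN + 1] s0).2] := by
        rw [pvChainS_add]
        congr 1
        show [(pvStep A B C D ((pvStep A B C D)^[iN] s0)).2] = [((pvStep A B C D)^[iN + 1] s0).2]
        rw [hs]
      have hout : ([S1, S2] ++ (pvChainS A B C D iN s0).map pvG)
            ++ [pvG (((pvStep A B C D)^[iN + 1] s0).2)]
          = [S1, S2] ++ (pvChainS A B C D (iN + 1) s0).map pvG := by
        rw [hchain]; simp
      rw [hcast, hs, hout]
      apply ih (iN + 1) _ (by omega)
      intro st j hj
      by_cases hst : st = (pvStep A B C D)^[iN] s0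
      · subst hst
        rw [PySem.Dict.get?_insert_self] at hj
        exact ⟨iN, by injection hj with h; exact h.symm, by omega, rfl⟩
      · rw [PySem.Dict.get?_insert_of_ne _ _ hst] at hj
        obtain ⟨jn, h1, h2, h3⟩ := hseen st j hj
        exact ⟨jn, h1, by omega, h3⟩
    | some j =>
      simp only []
      obtain ⟨jn, hj, hjlt, hjst⟩ := hseen _ j hget
      subst hj
      have hiN : iN < nN := by omega
      have hlam : 0 < iN - jn := by omega
      have hrem : 0 < nN - iN := by omega
      have hfix : (pvStep A B C D)^[iN - jn] ((pvStep A B C D)^[iN] s0)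
          = (pvStep A B C D)^[iN] s0 := by
        conv_lhs => rw [← hjst, ← Function.iterate_add_apply]
        have hh : iN - jn + jn = iN := by omega
        rw [hh]
      have hsplit_i : pvChainS A B C D iN s0
          = pvChainS A B C D jn s0 ++ pvChainS A B C D (iN - jn) ((pvStep A B C D)^[iN] s0) := by
        have h : iN = jn + (iN - jn) := by omega
        conv_lhs => rw [h]
        rw [pvChainS_add, hjst]
      have hcyc : PySem.List.slice ([S1, S2] ++ (pvChainS A B C D iN s0).map pvG)
            (some (2 + (jn : Int))) (some (2 + (iN : Int)))
          = (pvChainS A B C D (iN - jn) ((pvStep A B C D)^[iN] s0)).map pvG := by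
        have h1 : (2 + (jn : Int)) = ((2 + jn : Nat) : Int) := by push_cast; ring
        have h2 : (2 + (iN : Int)) = ((2 + iN : Nat) : Int) := by push_cast; ring
        rw [h1, h2, PySem.List.slice_natCast]
        have hd : (([S1, S2] ++ (pvChainS A B C D iN s0).map pvG).drop (2 + jn))
            = ((pvChainS A B C D iN s0).map pvG).drop jn := by
          rw [show 2 + jn = jn + 2 by omega]
          rfl
        rw [hd, hsplit_i, List.map_append,
          List.drop_append_of_le_length (by simp [pvChainS_length])]
        rw [List.drop_of_length_le (by simp [pvChainS_length])]
        simp only [List.nil_append]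
        rw [List.take_of_length_le (by simp [pvChainS_length]; omega)]
      have hlamI : (iN : Int) - (jn : Int) = ((iN - jn : Nat) : Int) := by push_cast; omega
      have hremI : ((nN : Nat) : Int) - (iN : Int) = ((nN - iN : Nat) : Int) := by push_cast; omega
      have hq : (PySem.Int.floordiv ((nN - iN : Nat) : Int) ((iN - jn : Nat) : Int) + 1).toNat
          = (nN - iN) / (iN - jn) + 1 := by
        rw [PySem.Int.floordiv_natCast]
        generalize (nN - iN) / (iN - jn) = q0
        rw [show ((q0 : Nat) : Int) + 1 = ((q0 + 1 : Nat) : Int) by push_cast; ring,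
          Int.toNat_natCast]
      have hbound : nN - iN ≤ ((nN - iN) / (iN - jn) + 1) * (iN - jn) := by
        have h1 := Nat.div_add_mod (nN - iN) (iN - jn)
        have h2 := Nat.mod_lt (nN - iN) hlam
        have h3 := Nat.add_mul ((nN - iN) / (iN - jn)) 1 (iN - jn)
        have h4 := Nat.mul_comm ((nN - iN) / (iN - jn)) (iN - jn)
        omega
      have hper := pvChainS_periodic A B C D (iN - jn) ((pvStep A B C D)^[iN] s0) hlam hfix
        ((nN - iN) / (iN - jn) + 1) (nN - iN) hbound
      have hsplit_n : pvChainS A B C D nN s0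
          = pvChainS A B C D iN s0 ++ pvChainS A B C D (nN - iN) ((pvStep A B C D)^[iN] s0) := by
        have h : nN = iN + (nN - iN) := by omega
        conv_lhs => rw [h]
        rw [pvChainS_add]
      rw [hcyc, hlamI, hremI, hq, PySem.List.slice_to_natCast,
        pv_flatten_replicate_map, ← List.map_take, ← hper, hsplit_n]
      simp

-- ===== VERDICT (by name: the statement is the Claim_ definition above) =====
theorem generate_s_spec : Claim_equal_generate_s := by
  intro S1 S2 N A B C D _ _
  show generate_s S1 S2 N A B C D = generate_s_alt S1 S2 N A B C D
  unfold generate_s generate_s_alt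
  rw [foldl_ignore_eq_iterate]
  have hx := pvIterate_step A B C D (PySem.List.pyRange 0 (N - 2) 1).length [] (pvOrd S1) (pvOrd S2)
  simp only [List.nil_append] at hx
  rw [hx, PySem.List.length_pyRange_one]
  have hn : (N - 2 - 0).toNat = (N - 2).toNat := by omega
  rw [hn]
  have hslice : PySem.List.slice
      (([pvOrd S1, pvOrd S2] : List Int) ++ pvChain A B C D (N - 2).toNat (pvOrd S1) (pvOrd S2))
      (some 2) none
      = pvChain A B C D (N - 2).toNat (pvOrd S1) (pvOrd S2) := by
    simp [pysem]
  rw [hslice, PySem.List.foldl_append_singleton_eq_map]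
  congr 1
  have hfun : (fun xi : Int => String.ofList [Char.ofNat (97 + PySem.Int.mod xi 26).toNat]) = pvG := rfl
  rw [hfun]
  by_cases h0 : N - 2 ≤ 0
  · have h1 : (N - 2).toNat = 0 := by omega
    rw [h1]
    show [S1, S2] ++ (pvChain A B C D 0 (pvOrd S1) (pvOrd S2)).map pvG
        = pvBLoop A B C D (N - 2) 0 0 (pvOrd S1, pvOrd S2) PySem.Dict.empty [S1, S2]
    rfl
  · have hinv := pvBLoop_inv A B C D S1 S2 (pvOrd S1, pvOrd S2) (N - 2).toNat (N - 2).toNat 0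
      PySem.Dict.empty (by omega)
      (by intro st j hj; rw [PySem.Dict.get?_empty] at hj; cases hj)
    simp only [Function.iterate_zero, id_eq, Nat.cast_zero] at hinv
    rw [show pvChainS A B C D 0 (pvOrd S1, pvOrd S2) = [] from rfl] at hinv
    simp only [List.map_nil, List.append_nil] at hinv
    rw [pvChainS_eq_chain] at hinv
    have h2 : (N - 2) = (((N - 2).toNat : Nat) : Int) := by omega
    conv_rhs => rw [h2]
    exact hinv.symm
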